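-- pv_equiv track=rewrite | github.com/KshkB/polyfactor-le | main.py | guessLog
-- ===== SOURCE A (Python) =====
-- def guessLog(guess, factor1, factor2):
--     log = {}
--     m = max(len(factor1), len(factor2))
--     if len(guess) == m:
--         if len(factor1) == len(factor2):
--             for index, coeff in enumerate(guess):
--                 if coeff == factor1[index] or coeff == factor2[index]:
--                     log[index] = f"{coeff} at position {index} is correct!"
--                 else:
--                     log[index] = f"{coeff} at position {index} is incorrect."
--             return log
--
--         if len(factor1) < len(factor2):
--             for index, coeff in enumerate(guess):
--                 if index < len(factor1):
--                     if coeff == factor1[index] or coeff == factor2[index]: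
--                         log[index] = f"{coeff} at position {index} is correct!"
--                     else:
--                         log[index] = f"{coeff} at position {index} is incorrect."
--                 if index >= len(factor1):
--                     if coeff == factor2[index]:
--                         log[index] = f"{coeff} at position {index} is correct!"
--                     else:
--                         log[index] = f"{coeff} at position {index} is incorrect."
--             return log
--
--         if len(factor2) < len(factor1):
--             for index, coeff in enumerate(guess):
--                 if index < len(factor2):
--                     if coeff == factor2[index] or coeff == factor1[index]:
--                         log[index] = f"{coeff} at position {index} is correct!"
--                     else:
--                         log[index] = f"{coeff} at position {index} is incorrect."
--                 if index >= len(factor2):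
--                     if coeff == factor1[index]:
--                         log[index] = f"{coeff} at position {index} is correct!"
--                     else:
--                         log[index] = f"{coeff} at position {index} is incorrect."
--             return log
--
--     if len(guess) > m:
--         guess = guess[:m]
--         return guessLog(guess, factor1, factor2)
-- ===== SOURCE B (Python) =====
-- def guessLog(guess, factor1, factor2):
--     m = max(len(factor1), len(factor2))
--     if len(guess) < m:
--         return None
--     correct = set()
--     for i, (g, f) in enumerate(zip(guess, factor1)):
--         if g == f:
--             correct.add(i)
--     for i, (g, f) in enumerate(zip(guess, factor2)):
--         if g == f:
--             correct.add(i)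
--     log = {}
--     for i in range(m):
--         if i in correct:
--             log[i] = f"{guess[i]} at position {i} is correct!"
--         else:
--             log[i] = f"{guess[i]} at position {i} is incorrect."
--     return log
-- ===== Notes on version B (the rewrite author's own statement) =====
-- stated objective: alternative
-- what changed: Replaces A's three length-dispatched dict-building loops and tail-recursive truncation with a staged pipeline: two zip passes build a hash set of correct indices, then one formatting pass over range(m) consults that set; len(guess) < m returns None via a guard.
import Mathlib
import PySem

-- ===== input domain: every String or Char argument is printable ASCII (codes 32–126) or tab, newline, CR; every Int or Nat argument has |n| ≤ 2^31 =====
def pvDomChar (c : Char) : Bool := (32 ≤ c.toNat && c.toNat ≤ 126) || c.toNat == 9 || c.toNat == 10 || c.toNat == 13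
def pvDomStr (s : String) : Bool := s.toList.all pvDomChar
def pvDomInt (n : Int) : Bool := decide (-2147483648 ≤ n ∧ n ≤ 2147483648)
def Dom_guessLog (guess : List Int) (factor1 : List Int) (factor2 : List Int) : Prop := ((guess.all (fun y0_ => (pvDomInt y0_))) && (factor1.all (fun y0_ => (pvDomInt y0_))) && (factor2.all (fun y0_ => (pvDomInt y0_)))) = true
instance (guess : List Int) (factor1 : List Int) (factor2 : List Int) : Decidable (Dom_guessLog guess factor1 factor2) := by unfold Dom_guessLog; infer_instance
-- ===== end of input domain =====

-- B stages the work differently from A: two zip passes build a set of correct indices, then one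
-- formatting pass over range(m) consults it (objective: alternative decomposition, same cost).

-- ===== PORT A =====
-- literal port of A; the dict 'log' is a PySem.Dict, returned as its items list.
-- factorK[index] is always in range in the branch where it is read; ported as pyGetD _ _ 0 (exact there).
def guessLog (guess : List Int) (factor1 : List Int) (factor2 : List Int) : Option (List (Int × String)) :=
  let m := max factor1.length factor2.length
  if guess.length = m then
    if factor1.length = factor2.length then
      some (((PySem.List.enumerate guess 0).foldl (fun (log : PySem.Dict Int String) p =>
        let index := p.1; let coeff := p.2
        if coeff == PySem.List.pyGetD factor1 index 0 || coeff == PySem.List.pyGetD factor2 index 0 then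
          log.insert index (PySem.Int.toStr coeff ++ " at position " ++ PySem.Int.toStr index ++ " is correct!")
        else
          log.insert index (PySem.Int.toStr coeff ++ " at position " ++ PySem.Int.toStr index ++ " is incorrect.")) PySem.Dict.empty).items)
    else if factor1.length < factor2.length then
      some (((PySem.List.enumerate guess 0).foldl (fun (log : PySem.Dict Int String) p =>
        let index := p.1; let coeff := p.2
        let log :=
          if index < (factor1.length : Int) then
            if coeff == PySem.List.pyGetD factor1 index 0 || coeff == PySem.List.pyGetD factor2 index 0 then
              log.insert index (PySem.Int.toStr coeff ++ " at position " ++ PySem.Int.toStr index ++ " is correct!")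
            else
              log.insert index (PySem.Int.toStr coeff ++ " at position " ++ PySem.Int.toStr index ++ " is incorrect.")
          else log
        if index ≥ (factor1.length : Int) then
          if coeff == PySem.List.pyGetD factor2 index 0 then
            log.insert index (PySem.Int.toStr coeff ++ " at position " ++ PySem.Int.toStr index ++ " is correct!")
          else
            log.insert index (PySem.Int.toStr coeff ++ " at position " ++ PySem.Int.toStr index ++ " is incorrect.")
        else log) PySem.Dict.empty).items)
    else if factor2.length < factor1.length then
      some (((PySem.List.enumerate guess 0).foldl (fun (log : PySem.Dict Int String) p =>
        let index := p.1; let coeff := p.2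
        let log :=
          if index < (factor2.length : Int) then
            if coeff == PySem.List.pyGetD factor2 index 0 || coeff == PySem.List.pyGetD factor1 index 0 then
              log.insert index (PySem.Int.toStr coeff ++ " at position " ++ PySem.Int.toStr index ++ " is correct!")
            else
              log.insert index (PySem.Int.toStr coeff ++ " at position " ++ PySem.Int.toStr index ++ " is incorrect.")
          else log
        if index ≥ (factor2.length : Int) then
          if coeff == PySem.List.pyGetD factor1 index 0 then
            log.insert index (PySem.Int.toStr coeff ++ " at position " ++ PySem.Int.toStr index ++ " is correct!")
          else
            log.insert index (PySem.Int.toStr coeff ++ " at position " ++ PySem.Int.toStr index ++ " is incorrect.")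
        else log) PySem.Dict.empty).items)
    else none  -- unreachable: trichotomy of the three length comparisons
  else if guess.length > m then
    guessLog (PySem.List.slice guess none (some (m : Int))) factor1 factor2
  else none
termination_by guess.length
decreasing_by
  rename_i _ h2
  rw [PySem.List.slice_to_natCast]
  simp only [List.length_take]
  omega

-- ===== PORT B =====
-- the 'for i,(g,f) in enumerate(zip(guess, factor)): if g == f: correct.add(i)' loop of Source B
def markCorrect (pairs : List (Int × (Int × Int))) (correct : PySem.Set Int) : PySem.Set Int :=
  pairs.foldl (fun s p => if p.2.1 == p.2.2 then PySem.Set.add s p.1 else s) correct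

-- the set 'correct' after Source B's two marking loops
def correctSet (guess : List Int) (factor1 : List Int) (factor2 : List Int) : PySem.Set Int :=
  markCorrect (PySem.List.enumerate (guess.zip factor2) 0)
    (markCorrect (PySem.List.enumerate (guess.zip factor1) 0) PySem.Set.empty)

def guessLog_alt (guess : List Int) (factor1 : List Int) (factor2 : List Int) : Option (List (Int × String)) :=
  if guess.length < max factor1.length factor2.length then none
  else
    some (((PySem.List.pyRange 0 (max factor1.length factor2.length : Int) 1).foldl (fun (log : PySem.Dict Int String) i =>
      if (correctSet guess factor1 factor2).contains i then
        log.insert i (PySem.Int.toStr (PySem.List.pyGetD guess i 0) ++ " at position " ++ PySem.Int.toStr i ++ " is correct!")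
      else
        log.insert i (PySem.Int.toStr (PySem.List.pyGetD guess i 0) ++ " at position " ++ PySem.Int.toStr i ++ " is incorrect.")) PySem.Dict.empty).items)

-- ===== PRECONDITION & SPEC =====
def Spec_guessLog (guess : List Int) (factor1 : List Int) (factor2 : List Int) (out : Option (List (Int × String))) : Prop := out = guessLog_alt guess factor1 factor2
instance (guess : List Int) (factor1 : List Int) (factor2 : List Int) (out : Option (List (Int × String))) : Decidable (Spec_guessLog guess factor1 factor2 out) := by unfold Spec_guessLog; infer_instance

-- ===== CLAIM (what is proved, stated in full; the proofs are below) =====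
def Claim_equal_guessLog : Prop := ∀ (guess : List Int) (factor1 : List Int) (factor2 : List Int), Dom_guessLog guess factor1 factor2 → Spec_guessLog guess factor1 factor2 (guessLog guess factor1 factor2)

-- ===== LEMMAS AND PROOFS =====

def msgT (i c : Int) : String :=
  PySem.Int.toStr c ++ " at position " ++ PySem.Int.toStr i ++ " is correct!"

def msgF (i c : Int) : String :=
  PySem.Int.toStr c ++ " at position " ++ PySem.Int.toStr i ++ " is incorrect."

-- the common normal form both programs compute (when len(guess) = m)
def canon (guess factor1 factor2 : List Int) : List (Int × String) :=
  (List.range (max factor1.length factor2.length)).map (fun (k : Nat) =>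
    ((k : Int),
      if (decide (k < factor1.length) && (guess.getD k 0 == factor1.getD k 0)) ||
         (decide (k < factor2.length) && (guess.getD k 0 == factor2.getD k 0)) then
        msgT (k : Int) (guess.getD k 0)
      else
        msgF (k : Int) (guess.getD k 0)))

-- a loop inserting at the fresh increasing keys of enumerate is the corresponding map
theorem loop_items (guess : List Int) (V : Int → Int → String) :
    ((PySem.List.enumerate guess 0).foldl
      (fun (log : PySem.Dict Int String) p => log.insert p.1 (V p.1 p.2)) PySem.Dict.empty).items
    = (List.range guess.length).map (fun (k : Nat) => ((k : Int), V (k : Int) (guess.getD k 0))) := by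
  rw [PySem.Dict.items_foldl_insert_fresh (PySem.List.enumerate guess 0) (fun p => p.1)
        (fun p => V p.1 p.2) PySem.Dict.empty
        (by intro a _; simp)
        (by rw [PySem.List.map_fst_enumerate, PySem.List.pyRange_one]
            refine List.Nodup.map ?_ List.nodup_range
            intro a b hab; simpa using hab)]
  apply List.ext_getElem
  · simp [PySem.List.length_enumerate, PySem.Dict.empty]
  · intro k h1 h2
    have hk : k < guess.length := by
      simpa [PySem.List.length_enumerate, PySem.Dict.empty] using h1
    simp [PySem.List.getElem_enumerate, PySem.Dict.empty, List.getD_eq_getElem?_getD,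
      List.getElem?_eq_getElem hk]

theorem guessLog_canon (guess factor1 factor2 : List Int)
    (h : guess.length = max factor1.length factor2.length) :
    guessLog guess factor1 factor2 = some (canon guess factor1 factor2) := by
  rw [guessLog, canon]
  simp only [if_pos h]
  by_cases h12 : factor1.length = factor2.length
  · rw [if_pos h12]
    rw [PySem.List.foldl_congr_mem _ _
        (fun (log : PySem.Dict Int String) p => log.insert p.1
          (if p.2 == PySem.List.pyGetD factor1 p.1 0 || p.2 == PySem.List.pyGetD factor2 p.1 0
           then msgT p.1 p.2 else msgF p.1 p.2)) _
        (by intro acc p _; simp only [msgT, msgF]; split_ifs <;> rfl)]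
    rw [loop_items guess (fun i c =>
      if c == PySem.List.pyGetD factor1 i 0 || c == PySem.List.pyGetD factor2 i 0
      then msgT i c else msgF i c)]
    refine congrArg some ?_
    rw [h]
    refine List.map_congr_left ?_
    intro k hk
    rw [List.mem_range] at hk
    have hk1 : k < factor1.length := by omega
    have hk2 : k < factor2.length := by omega
    simp [hk1, hk2]
  · by_cases hlt : factor1.length < factor2.length
    · rw [if_neg h12, if_pos hlt]
      rw [PySem.List.foldl_congr_mem _ _
          (fun (log : PySem.Dict Int String) p => log.insert p.1
            (if p.1 < (factor1.length : Int) then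
              (if p.2 == PySem.List.pyGetD factor1 p.1 0 || p.2 == PySem.List.pyGetD factor2 p.1 0
               then msgT p.1 p.2 else msgF p.1 p.2)
             else
              (if p.2 == PySem.List.pyGetD factor2 p.1 0
               then msgT p.1 p.2 else msgF p.1 p.2))) _
          (by intro acc p _
              simp only [msgT, msgF]
              by_cases hi : p.1 < (factor1.length : Int)
              · simp [hi, not_le.2 hi]; split <;> rfl
              · simp [hi, not_lt.1 hi]; split <;> rfl)]
      rw [loop_items guess (fun i c =>
        if i < (factor1.length : Int) then
          (if c == PySem.List.pyGetD factor1 i 0 || c == PySem.List.pyGetD factor2 i 0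
           then msgT i c else msgF i c)
        else
          (if c == PySem.List.pyGetD factor2 i 0 then msgT i c else msgF i c))]
      refine congrArg some ?_
      rw [h]
      refine List.map_congr_left ?_
      intro k hk
      rw [List.mem_range] at hk
      have hk2 : k < factor2.length := by omega
      by_cases hk1 : k < factor1.length
      · simp [hk1, hk2]
      · simp [hk1, hk2, show ¬ ((k : Int) < (factor1.length : Int)) by exact_mod_cast hk1]
    · rw [if_neg h12, if_neg hlt, if_pos (by omega)]
      rw [PySem.List.foldl_congr_mem _ _
          (fun (log : PySem.Dict Int String) p => log.insert p.1
            (if p.1 < (factor2.length : Int) then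
              (if p.2 == PySem.List.pyGetD factor2 p.1 0 || p.2 == PySem.List.pyGetD factor1 p.1 0
               then msgT p.1 p.2 else msgF p.1 p.2)
             else
              (if p.2 == PySem.List.pyGetD factor1 p.1 0
               then msgT p.1 p.2 else msgF p.1 p.2))) _
          (by intro acc p _
              simp only [msgT, msgF]
              by_cases hi : p.1 < (factor2.length : Int)
              · simp [hi, not_le.2 hi]; split <;> rfl
              · simp [hi, not_lt.1 hi]; split <;> rfl)]
      rw [loop_items guess (fun i c =>
        if i < (factor2.length : Int) then
          (if c == PySem.List.pyGetD factor2 i 0 || c == PySem.List.pyGetD factor1 i 0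
           then msgT i c else msgF i c)
        else
          (if c == PySem.List.pyGetD factor1 i 0 then msgT i c else msgF i c))]
      refine congrArg some ?_
      rw [h]
      refine List.map_congr_left ?_
      intro k hk
      rw [List.mem_range] at hk
      have hk1 : k < factor1.length := by omega
      by_cases hk2 : k < factor2.length
      · simp [hk1, hk2, Bool.or_comm]
      · simp [hk1, hk2, show ¬ ((k : Int) < (factor2.length : Int)) by exact_mod_cast hk2]

-- membership in the set built by markCorrect
theorem mem_markCorrect (pairs : List (Int × (Int × Int))) (s : PySem.Set Int) (x : Int) :
    x ∈ markCorrect pairs s ↔ x ∈ s ∨ ∃ p ∈ pairs, p.2.1 = p.2.2 ∧ x = p.1 := by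
  induction pairs generalizing s with
  | nil => simp [markCorrect]
  | cons p l ih =>
    rw [markCorrect, List.foldl_cons, ← markCorrect, ih]
    by_cases hp : p.2.1 = p.2.2
    · simp [hp, PySem.Set.mem_add]
      tauto
    · simp only [beq_iff_eq, if_neg hp, List.mem_cons]
      constructor
      · rintro (h | ⟨q, hq, h1, h2⟩)
        · exact Or.inl h
        · exact Or.inr ⟨q, Or.inr hq, h1, h2⟩
      · rintro (h | ⟨q, (rfl | hq), h1, h2⟩)
        · exact Or.inl h
        · exact absurd h1 hp
        · exact Or.inr ⟨q, hq, h1, h2⟩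

theorem mem_markCorrect_zip (guess f : List Int) (s : PySem.Set Int) (k : Nat) :
    (k : Int) ∈ markCorrect (PySem.List.enumerate (guess.zip f) 0) s
      ↔ (k : Int) ∈ s ∨ (k < guess.length ∧ k < f.length ∧ guess.getD k 0 = f.getD k 0) := by
  rw [mem_markCorrect]
  constructor
  · rintro (h | ⟨p, hp, h1, h2⟩)
    · exact Or.inl h
    · rw [PySem.List.mem_enumerate_iff] at hp
      obtain ⟨j, hj, rfl⟩ := hp
      simp only [List.length_zip, lt_min_iff] at hj
      have hkj : k = j := by
        have : (0 : Int) + j = (k : Int) := h2.symm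
        omega
      subst hkj
      refine Or.inr ⟨hj.1, hj.2, ?_⟩
      have hz := List.getElem_zip (l := guess) (l' := f)
        (i := k) (h := by simp [List.length_zip]; omega)
      rw [hz] at h1
      simpa [List.getD_eq_getElem?_getD, List.getElem?_eq_getElem hj.1,
        List.getElem?_eq_getElem hj.2] using h1
  · rintro (h | ⟨h1, h2, h3⟩)
    · exact Or.inl h
    · refine Or.inr ⟨((0 : Int) + k, (guess.zip f)[k]'(by simp [List.length_zip]; omega)), ?_, ?_, ?_⟩
      · rw [PySem.List.mem_enumerate_iff]
        exact ⟨k, by simp [List.length_zip]; omega, rfl⟩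
      · rw [List.getElem_zip]
        simpa [List.getD_eq_getElem?_getD, List.getElem?_eq_getElem h1,
          List.getElem?_eq_getElem h2] using h3
      · simp

theorem guessLog_alt_canon (guess factor1 factor2 : List Int)
    (h : max factor1.length factor2.length ≤ guess.length) :
    guessLog_alt guess factor1 factor2 = some (canon guess factor1 factor2) := by
  rw [guessLog_alt, canon]
  rw [if_neg (by omega), ← Nat.cast_max]
  set correct := correctSet guess factor1 factor2 with hc
  rw [PySem.List.foldl_congr_mem _ _
      (fun (log : PySem.Dict Int String) i => log.insert i
        (if correct.contains i then msgT i (PySem.List.pyGetD guess i 0)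
         else msgF i (PySem.List.pyGetD guess i 0))) _
      (by intro acc i _; simp only [msgT, msgF]; split_ifs <;> rfl)]
  rw [PySem.Dict.items_foldl_insert_fresh (PySem.List.pyRange 0 (((max factor1.length factor2.length : Nat)) : Int) 1)
        (fun i => i)
        (fun i => if correct.contains i then msgT i (PySem.List.pyGetD guess i 0)
                  else msgF i (PySem.List.pyGetD guess i 0)) PySem.Dict.empty
        (by intro a _; simp)
        (by simpa using PySem.List.nodup_pyRange_one 0 (((max factor1.length factor2.length : Nat)) : Int))]
  refine congrArg some ?_
  have hemp : (PySem.Dict.empty : PySem.Dict Int String).items = [] := rfl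
  rw [hemp, List.nil_append, PySem.List.pyRange_one]
  rw [show ((((max factor1.length factor2.length : Nat)) : Int) - 0).toNat = max factor1.length factor2.length by omega]
  rw [List.map_map]
  refine List.map_congr_left ?_
  intro k hk
  rw [List.mem_range] at hk
  have hkg : k < guess.length := by omega
  have hiff : ((k : Int) ∈ correct)
      ↔ ((k < factor1.length ∧ guess.getD k 0 = factor1.getD k 0) ∨
         (k < factor2.length ∧ guess.getD k 0 = factor2.getD k 0)) := by
    rw [hc, correctSet, mem_markCorrect_zip, mem_markCorrect_zip]
    simp only [PySem.Set.empty, List.not_mem_nil, false_or]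
    constructor
    · rintro (⟨_, a, b⟩ | ⟨_, a, b⟩)
      · exact Or.inl ⟨a, b⟩
      · exact Or.inr ⟨a, b⟩
    · rintro (⟨a, b⟩ | ⟨a, b⟩)
      · exact Or.inl ⟨hkg, a, b⟩
      · exact Or.inr ⟨hkg, a, b⟩
  have hcontains : correct.contains ((k : Nat) : Int)
      = ((decide (k < factor1.length) && (guess.getD k 0 == factor1.getD k 0)) ||
         (decide (k < factor2.length) && (guess.getD k 0 == factor2.getD k 0))) := by
    rw [Bool.eq_iff_iff, PySem.Set.contains_iff, hiff]
    simp
  have hget : PySem.List.pyGetD guess ((k : Nat) : Int) 0 = guess.getD k 0 := by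
    simp [PySem.List.pyGetD_natCast]
  simp only [Function.comp, zero_add, hcontains, hget]

theorem canon_take (guess factor1 factor2 : List Int) :
    canon (guess.take (max factor1.length factor2.length)) factor1 factor2
      = canon guess factor1 factor2 := by
  rw [canon, canon]
  refine List.map_congr_left ?_
  intro k hk
  rw [List.mem_range] at hk
  have : (guess.take (max factor1.length factor2.length)).getD k 0 = guess.getD k 0 := by
    rw [List.getD_eq_getElem?_getD, List.getD_eq_getElem?_getD, List.getElem?_take_of_lt hk]
  rw [this]

-- ===== VERDICT (by name: the statement is the Claim_ definition above) =====
theorem guessLog_spec : Claim_equal_guessLog := by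
  intro guess factor1 factor2 _
  unfold Spec_guessLog
  by_cases h1 : guess.length = max factor1.length factor2.length
  · rw [guessLog_canon guess factor1 factor2 h1,
      guessLog_alt_canon guess factor1 factor2 (le_of_eq h1.symm)]
  · by_cases h2 : guess.length > max factor1.length factor2.length
    · rw [guessLog]
      simp only [if_neg h1, if_pos h2]
      rw [PySem.List.slice_to_natCast]
      rw [guessLog_canon _ _ _ (by simp; omega)]
      rw [guessLog_alt_canon guess factor1 factor2 (le_of_lt h2)]
      exact congrArg some (canon_take guess factor1 factor2)
    · rw [guessLog, guessLog_alt]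
      simp only [if_neg h1, if_neg h2]
      rw [if_pos (by omega)]
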